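-- pv_equiv track=rewrite | github.com/singhsanjana/fensying | src/allocate_fence_orders.py | solution_by_files
-- ===== SOURCE A (Python) =====
-- def solution_by_files(solution): # solution dict: fence -> mo
-- 	solution_files = {}
-- 	for fence in solution:
-- 		filename = fence.split('@')[1]
-- 		fence_pos = fence.split('@')[0]
--
-- 		if filename in solution_files:
-- 			solution_files[filename].append( (fence_pos, solution[fence]) )
-- 		else:
-- 			solution_files[filename] = [ (fence_pos, solution[fence]) ]
--
-- 	return solution_files
-- ===== SOURCE B (Python) =====
-- def solution_by_files(solution):  # solution dict: fence -> mo
--     rows = [(fence.split('@')[1], fence.split('@')[0], mo) for fence, mo in solution.items()]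
--     return {f: [(pos, mo) for g, pos, mo in rows if g == f]
--             for f in dict.fromkeys(g for g, _, _ in rows)}
-- ===== Notes on version B (the rewrite author's own statement) =====
-- stated objective: alternative
-- what changed: Replaces A's one-pass incremental dict mutation (append-or-insert per entry) by a two-pass decomposition: split every fence once into a rows list, dedup the filenames, then build the result as a comprehension with one filter pass per distinct filename.
import Mathlib
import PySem

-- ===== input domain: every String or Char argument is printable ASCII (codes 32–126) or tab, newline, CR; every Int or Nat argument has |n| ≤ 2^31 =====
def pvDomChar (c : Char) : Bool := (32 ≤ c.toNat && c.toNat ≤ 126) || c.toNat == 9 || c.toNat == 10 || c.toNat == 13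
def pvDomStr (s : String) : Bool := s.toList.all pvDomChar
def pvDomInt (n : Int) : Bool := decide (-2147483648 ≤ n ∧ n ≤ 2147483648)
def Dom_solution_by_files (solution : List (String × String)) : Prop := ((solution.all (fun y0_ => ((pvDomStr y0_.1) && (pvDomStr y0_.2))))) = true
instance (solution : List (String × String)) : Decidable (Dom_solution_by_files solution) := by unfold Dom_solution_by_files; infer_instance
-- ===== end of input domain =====

-- B groups in two passes (collect rows once, then one filter per distinct filename) instead of A's
-- incremental dict mutation; objective: alternative decomposition, same results. (No observable mutation.)


-- ===== PORT A =====
def solution_by_files (solution : List (String × String)) : List (String × List (String × String)) :=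
  (solution.foldl
    (fun d p =>
      let filename := (PySem.List.pyGet? ((PySem.Str.split? p.1 "@").getD []) 1).getD ""
      let fence_pos := (PySem.List.pyGet? ((PySem.Str.split? p.1 "@").getD []) 0).getD ""
      let mo := ((PySem.Dict.mk solution).get? p.1).getD ""
      if d.contains filename then d.modify filename [] (fun l => l ++ [(fence_pos, mo)])
      else d.insert filename [(fence_pos, mo)])
    PySem.Dict.empty).items

-- ===== PORT B =====
def solution_by_files_alt (solution : List (String × String)) : List (String × List (String × String)) :=
  let rows := solution.map (fun p =>
    ((PySem.List.pyGet? ((PySem.Str.split? p.1 "@").getD []) 1).getD "",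
     (PySem.List.pyGet? ((PySem.Str.split? p.1 "@").getD []) 0).getD "", p.2))
  (PySem.List.dedup (rows.map (fun r => r.1))).map
    (fun f => (f, (rows.filter (fun r => r.1 == f)).map (fun r => (r.2.1, r.2.2))))

-- ===== PRECONDITION & SPEC =====
-- Pre_ excludes keys containing no '@' (A raises IndexError on fence.split('@')[1]) and assoc lists
-- with duplicate keys, which do not represent a Python dict (the input's type in A).
def Pre_solution_by_files (solution : List (String × String)) : Prop :=
  (solution.map Prod.fst).Nodup ∧ ∀ p ∈ solution, PySem.Str.isIn "@" p.1 = true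
instance (solution : List (String × String)) : Decidable (Pre_solution_by_files solution) := by unfold Pre_solution_by_files; infer_instance
def pvWitness_solution_by_files : (List (String × String)) :=
  [("f1@a.c", "mo1"), ("f2@b.c", "mo2"), ("f3@a.c", "mo3")]
def Spec_solution_by_files (solution : List (String × String)) (out : List (String × List (String × String))) : Prop := out = solution_by_files_alt solution
instance (solution : List (String × String)) (out : List (String × List (String × String))) : Decidable (Spec_solution_by_files solution out) := by unfold Spec_solution_by_files; infer_instance

-- ===== CLAIM (what is proved, stated in full; the proofs are below) =====
def Claim_equal_solution_by_files : Prop := ∀ (solution : List (String × String)), Dom_solution_by_files solution → Pre_solution_by_files solution → Spec_solution_by_files solution (solution_by_files solution)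

-- ===== LEMMAS AND PROOFS =====

-- the filename / (fence_pos, value) extractors both ports share
def keyFn (p : String × String) : String :=
  (PySem.List.pyGet? ((PySem.Str.split? p.1 "@").getD []) 1).getD ""
def valFn (p : String × String) : String × String :=
  ((PySem.List.pyGet? ((PySem.Str.split? p.1 "@").getD []) 0).getD "", p.2)

-- the if-branching of A's loop body is exactly Dict.modify with an empty default
theorem step_eq_modify (d : PySem.Dict String (List (String × String)))
    (c : String) (x : String × String) :
    (if d.contains c then d.modify c [] (fun l => l ++ [x]) else d.insert c [x])
      = d.modify c [] (fun l => l ++ [x]) := by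
  by_cases h : d.contains c
  · simp [h]
  · rw [if_neg h, PySem.Dict.modify,
      PySem.Dict.getD_of_not_contains _ _ (by simpa using h), List.nil_append]

-- with distinct keys, looking the key up in the whole dict returns the pair's own value
theorem lookup_self (solution : List (String × String))
    (hnd : (solution.map Prod.fst).Nodup) (p : String × String) (hp : p ∈ solution) :
    ((PySem.Dict.mk solution).get? p.1).getD "" = p.2 := by
  have h := PySem.Dict.get?_of_mem_items (PySem.Dict.mk solution)
      (k := p.1) (v := p.2) (by simpa using hp) (by simp [PySem.Dict.keys]; exact hnd)
  rw [h]; rfl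

-- grouping fold equals dedup-then-filter, for an arbitrary key/value extraction
theorem grp (key : (String × String) → String) (val : (String × String) → (String × String))
    (l : List (String × String)) :
    (l.foldl (fun d p => d.modify (key p) [] (fun t => t ++ [val p])) PySem.Dict.empty).items
      = (PySem.List.dedup (l.map key)).map
          (fun f => (f, (l.filter (fun p => key p == f)).map val)) := by
  induction l using List.reverseRecOn with
  | nil => rfl
  | append_singleton l x ih =>
    rw [List.foldl_append, List.foldl_cons, List.foldl_nil]
    set G := l.foldl (fun d p => d.modify (key p) [] (fun t => t ++ [val p])) PySem.Dict.empty with hG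
    have hkeys : G.keys = PySem.List.dedup (l.map key) := by
      show G.items.map Prod.fst = _
      rw [ih, List.map_map]; simp [Function.comp_def]
    have hknd : G.keys.Nodup := by rw [hkeys]; simp [PySem.Set.nodup_ofList]
    have hddl : PySem.List.dedup ((l ++ [x]).map key)
        = if key x ∈ l.map key then PySem.List.dedup (l.map key)
          else PySem.List.dedup (l.map key) ++ [key x] := by
      rw [List.map_append, List.map_cons, List.map_nil]
      rw [PySem.List.dedup_eq_ofList, PySem.List.dedup_eq_ofList,
        PySem.Set.ofList_append_singleton, PySem.Set.add]
      by_cases h : key x ∈ l.map key <;>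
        simp [PySem.Set.contains, h, PySem.Set.mem_ofList]
    rw [PySem.Dict.modify]
    by_cases hc : key x ∈ l.map key
    · -- key x already present: insert overwrites in place
      have hcont : G.contains (key x) = true := by
        rw [PySem.Dict.contains_iff_mem_keys, hkeys]; simpa using hc
      have hmem : (key x, (l.filter (fun p => key p == key x)).map val) ∈ G.items := by
        rw [ih]
        exact List.mem_map_of_mem (by simpa using hc)
      have hgetD : G.getD (key x) [] = (l.filter (fun p => key p == key x)).map val :=
        PySem.Dict.getD_of_mem_items G hmem hknd []
      rw [PySem.Dict.items_insert_of_contains _ _ hcont, hgetD, hddl, if_pos hc, ih,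
        List.map_map]
      apply List.map_congr_left
      intro f hf
      by_cases hfx : f = key x
      · subst hfx
        simp [List.filter_append]
      · have h2 : (key x == f) = false := by simpa using fun h => hfx h.symm
        simp only [Function.comp_def]
        rw [if_neg (by simp [hfx])]
        simp [List.filter_append, h2]
    · -- fresh key: insert appends
      have hcont : G.contains (key x) = false := by
        rw [PySem.Dict.contains_eq_decide_mem_keys, hkeys]
        simpa using hc
      have hgetD : G.getD (key x) [] = [] := PySem.Dict.getD_of_not_contains G [] hcont
      rw [PySem.Dict.items_insert_of_not_contains _ _ hcont, hgetD, hddl, if_neg hc, ih,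
        List.map_append, List.map_cons, List.map_nil, List.nil_append]
      congr 1
      · apply List.map_congr_left
        intro f hf
        have hfmem : f ∈ l.map key := by
          rw [PySem.List.dedup_eq_ofList] at hf
          exact (PySem.Set.mem_ofList _ _).mp hf
        have hne : (key x == f) = false := by
          simp only [beq_eq_false_iff_ne, ne_eq]
          intro h; exact hc (h ▸ hfmem)
        simp [List.filter_append, hne]
      · have hfl : l.filter (fun p => key p == key x) = [] := by
          rw [List.filter_eq_nil_iff]
          intro p hp hkp
          exact hc (List.mem_map.mpr ⟨p, hp, by simpa using hkp⟩)
        simp [List.filter_append, hfl]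

-- ===== VERDICT (by name: the statement is the Claim_ definition above) =====
theorem solution_by_files_spec : Claim_equal_solution_by_files := by
  intro solution _ hpre
  show solution_by_files solution = solution_by_files_alt solution
  unfold solution_by_files solution_by_files_alt
  rw [PySem.List.foldl_congr_mem _ _
    (fun d p => d.modify (keyFn p) [] (fun t => t ++ [valFn p])) _
    (by
      intro acc p hp
      simp only [keyFn, valFn]
      rw [lookup_self solution hpre.1 p hp]
      exact step_eq_modify acc _ _)]
  rw [grp keyFn valFn solution]
  simp only [List.map_map, List.filter_map, Function.comp_def]
  unfold keyFn valFn
  rfl
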